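-- pv_equiv track=rewrite | github.com/volcano852/pyevm | pyevm/instructions/binary_maths.py | sign_extend
-- ===== SOURCE A (Python) =====
-- def get_ith_bit(value, i):
--     return (2 ** i & value) // 2 ** i
--
-- def sign_extend(binary, number_bits, number_bits_extension):
--     res = 0
--     sign_bit = get_ith_bit(binary, number_bits - 1)
--     for i in range(number_bits_extension):
--         if i < number_bits:
--             res += get_ith_bit(binary, i) * 2 ** i
--         else:
--             res += sign_bit * 2 ** i
--     return res
-- ===== SOURCE B (Python) =====
-- def sign_extend(binary, number_bits, number_bits_extension):
--     ext = max(number_bits_extension, 0)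
--     sign_bit = (binary >> (number_bits - 1)) & 1
--     keep = min(number_bits, ext)
--     res = binary & ((1 << keep) - 1)
--     if sign_bit and ext > number_bits:
--         res += (1 << ext) - (1 << number_bits)
--     return res
-- ===== Notes on version B (the rewrite author's own statement) =====
-- stated objective: faster
-- what changed: Replaces A's per-bit loop (number_bits_extension iterations, each recomputing 2**i and a masked division) by O(1)-many big-int operations: mask the low min(number_bits, ext) bits, then, if the sign bit is set, add the sign-fill block (1<<ext)-(1<<number_bits).
import Mathlib
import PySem

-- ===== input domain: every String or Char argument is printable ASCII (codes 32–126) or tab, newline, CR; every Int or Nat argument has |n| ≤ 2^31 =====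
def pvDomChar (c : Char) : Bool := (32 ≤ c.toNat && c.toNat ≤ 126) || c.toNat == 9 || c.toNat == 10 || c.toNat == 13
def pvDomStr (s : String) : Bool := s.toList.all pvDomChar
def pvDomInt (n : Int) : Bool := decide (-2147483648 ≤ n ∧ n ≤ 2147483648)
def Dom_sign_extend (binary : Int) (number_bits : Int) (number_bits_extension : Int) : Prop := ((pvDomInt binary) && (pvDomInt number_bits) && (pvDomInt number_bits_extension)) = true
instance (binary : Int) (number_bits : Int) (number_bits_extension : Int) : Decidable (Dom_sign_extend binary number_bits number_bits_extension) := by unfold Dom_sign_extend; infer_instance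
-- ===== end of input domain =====

-- B replaces A's O(number_bits_extension) bit-by-bit loop by O(1)-many mask/shift
-- operations (mask the low bits, then add the sign-fill block); return value only.

-- ===== PORT A =====
-- Python: (2 ** i & value) // 2 ** i.  Under Pre_ every call site has 0 ≤ i, so
-- `i.toNat` is exact (for i < 0 Python's 2**i is a float and `&` raises TypeError,
-- which Pre_ excludes).
def get_ith_bit (value : Int) (i : Int) : Int :=
  PySem.Int.floordiv (PySem.Int.band ((2:Int) ^ i.toNat) value) ((2:Int) ^ i.toNat)

def sign_extend (binary : Int) (number_bits : Int) (number_bits_extension : Int) : Int :=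
  let sign_bit := get_ith_bit binary (number_bits - 1)
  (PySem.List.pyRange 0 number_bits_extension 1).foldl
    (fun res i =>
      if i < number_bits then res + get_ith_bit binary i * (2:Int) ^ i.toNat
      else res + sign_bit * (2:Int) ^ i.toNat) 0

-- ===== PORT B =====
-- transliteration of Source B; all shift amounts are ≥ 0 under Pre_, so `.toNat` is exact
def sign_extend_alt (binary : Int) (number_bits : Int) (number_bits_extension : Int) : Int :=
  let ext := max number_bits_extension 0
  let sign_bit := PySem.Int.band (binary >>> (number_bits - 1).toNat) 1
  let keep := min number_bits ext
  let res := PySem.Int.band binary (((1:Int) <<< keep.toNat) - 1)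
  if sign_bit ≠ 0 ∧ ext > number_bits then
    res + (((1:Int) <<< ext.toNat) - ((1:Int) <<< number_bits.toNat))
  else res

-- ===== PRECONDITION & SPEC =====
-- Pre_ excludes number_bits ≤ 0, where Python A raises TypeError
-- (2 ** (number_bits - 1) is a float, and float & int is unsupported).
def Pre_sign_extend (binary : Int) (number_bits : Int) (number_bits_extension : Int) : Prop :=
  1 ≤ number_bits
instance (binary : Int) (number_bits : Int) (number_bits_extension : Int) : Decidable (Pre_sign_extend binary number_bits number_bits_extension) := by unfold Pre_sign_extend; infer_instance

def pvWitness_sign_extend : Int × Int × Int := (-5, 4, 8)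

def Spec_sign_extend (binary : Int) (number_bits : Int) (number_bits_extension : Int) (out : Int) : Prop := out = sign_extend_alt binary number_bits number_bits_extension
instance (binary : Int) (number_bits : Int) (number_bits_extension : Int) (out : Int) : Decidable (Spec_sign_extend binary number_bits number_bits_extension out) := by unfold Spec_sign_extend; infer_instance

-- ===== CLAIM (what is proved, stated in full; the proofs are below) =====
def Claim_equal_sign_extend : Prop := ∀ (binary : Int) (number_bits : Int) (number_bits_extension : Int), Dom_sign_extend binary number_bits number_bits_extension → Pre_sign_extend binary number_bits number_bits_extension → Spec_sign_extend binary number_bits number_bits_extension (sign_extend binary number_bits number_bits_extension)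

-- ===== LEMMAS AND PROOFS =====

-- `b % 2^(n+1)` adds bit n on top of `b % 2^n`.
theorem pv_emod_pow_succ (b : Int) (n : Nat) :
    b % 2 ^ (n + 1) = b % 2 ^ n + b / 2 ^ n % 2 * 2 ^ n := by
  have hp : (0:Int) < 2 ^ n := by positivity
  have hq := Int.mul_ediv_add_emod b (2 ^ n)
  have hq2 := Int.mul_ediv_add_emod (b / 2 ^ n) 2
  have hr1 := Int.emod_nonneg b (by positivity : (2:Int) ^ n ≠ 0)
  have hr2 := Int.emod_lt_of_pos b hp
  have hs1 := Int.emod_nonneg (b / 2 ^ n) (by norm_num : (2:Int) ≠ 0)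
  have hs2 := Int.emod_lt_of_pos (b / 2 ^ n) (by norm_num : (0:Int) < 2)
  have key : (b % 2 ^ n + b / 2 ^ n % 2 * 2 ^ n) + 2 ^ (n + 1) * (b / 2 ^ n / 2) = b := by
    rw [pow_succ]; nlinarith [hq, hq2]
  rcases Int.ediv_emod_unique (a := b) (b := 2 ^ (n + 1))
      (r := b % 2 ^ n + b / 2 ^ n % 2 * 2 ^ n) (q := b / 2 ^ n / 2) (by positivity) |>.mpr
      ⟨key, by nlinarith, by rw [pow_succ]; nlinarith⟩ with ⟨_, h2⟩
  omega

-- Python `b & (2^n - 1)` is `b % 2^n` (emod), also for negative b.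
theorem pv_band_mask (b : Int) (n : Nat) :
    PySem.Int.band b ((2:Int) ^ n - 1) = b % 2 ^ n := by
  have hp : (0:Int) < 2 ^ n := by positivity
  have hpow : ((2 ^ n : Nat) : Int) = (2:Int) ^ n := by push_cast; rfl
  have h2n : (1:Nat) ≤ 2 ^ n := Nat.one_le_two_pow
  by_cases hb : 0 ≤ b
  · rw [show b = ((b.toNat : Nat) : Int) from (Int.toNat_of_nonneg hb).symm,
      show ((2:Int) ^ n - 1) = ((2 ^ n - 1 : Nat) : Int) by omega,
      PySem.Int.band_natCast, Nat.and_two_pow_sub_one_eq_mod]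
    push_cast
    rfl
  · push_neg at hb
    set m : Nat := (-b - 1).toNat with hmdef
    have hmb : ((m : Nat) : Int) = -b - 1 := Int.toNat_of_nonneg (by omega)
    have hband : PySem.Int.band b ((2:Int) ^ n - 1)
        = (((2 ^ n - 1) - ((2 ^ n - 1) &&& m) : Nat) : Int) := by
      simp only [PySem.Int.band]
      rw [if_neg (by omega), if_pos (by omega),
        show ((2:Int) ^ n - 1).toNat = 2 ^ n - 1 by omega]
    rw [hband, Nat.and_comm, Nat.and_two_pow_sub_one_eq_mod]
    have hdm := Nat.div_add_mod m (2 ^ n)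
    have hdiv : ((2 ^ n : Nat) : Int) * ((m / 2 ^ n : Nat) : Int)
        + ((m % 2 ^ n : Nat) : Int) = ((m : Nat) : Int) := by exact_mod_cast hdm
    have hlt : m % 2 ^ n < 2 ^ n := Nat.mod_lt _ (by positivity)
    rcases Int.ediv_emod_unique (a := b) (b := 2 ^ n)
        (r := (2:Int) ^ n - 1 - ((m % 2 ^ n : Nat) : Int))
        (q := -(((m / 2 ^ n : Nat) : Int)) - 1) hp |>.mpr
        ⟨by nlinarith [hdiv, hmb], by omega, by omega⟩ with ⟨_, h2⟩
    omega

-- Python `2^n & b` extracts bit n (scaled), also for negative b.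
theorem pv_band_pow (b : Int) (n : Nat) :
    PySem.Int.band ((2:Int) ^ n) b = b / 2 ^ n % 2 * 2 ^ n := by
  have hp : (0:Int) < 2 ^ n := by positivity
  have hpow : ((2 ^ n : Nat) : Int) = (2:Int) ^ n := by push_cast; rfl
  by_cases hb : 0 ≤ b
  · rw [show b = ((b.toNat : Nat) : Int) from (Int.toNat_of_nonneg hb).symm,
      ← hpow, PySem.Int.band_natCast, Nat.and_comm, Nat.and_two_pow,
      Nat.testBit_eq_decide_div_mod_eq]
    have hc : ((b.toNat / 2 ^ n % 2 : Nat) : Int)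
        = ((b.toNat : Nat) : Int) / 2 ^ n % 2 := by push_cast; rfl
    push_cast
    rw [← hc]
    rcases Nat.mod_two_eq_zero_or_one (b.toNat / 2 ^ n) with h | h <;>
      simp [h, hpow]
  · push_neg at hb
    set m : Nat := (-b - 1).toNat with hmdef
    have hmb : ((m : Nat) : Int) = -b - 1 := Int.toNat_of_nonneg (by omega)
    have hband : PySem.Int.band ((2:Int) ^ n) b
        = (((2 ^ n) - ((2 ^ n) &&& m) : Nat) : Int) := by
      simp only [PySem.Int.band]
      rw [if_pos (by positivity), if_neg (by omega),
        show ((2:Int) ^ n).toNat = 2 ^ n by omega]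
    rw [hband, Nat.and_comm, Nat.and_two_pow, Nat.testBit_eq_decide_div_mod_eq]
    have hdm := Nat.div_add_mod m (2 ^ n)
    have hdiv : ((2 ^ n : Nat) : Int) * ((m / 2 ^ n : Nat) : Int)
        + ((m % 2 ^ n : Nat) : Int) = ((m : Nat) : Int) := by exact_mod_cast hdm
    have hlt : m % 2 ^ n < 2 ^ n := Nat.mod_lt _ (by positivity)
    rcases Int.ediv_emod_unique (a := b) (b := 2 ^ n)
        (r := (2:Int) ^ n - 1 - ((m % 2 ^ n : Nat) : Int))
        (q := -(((m / 2 ^ n : Nat) : Int)) - 1) hp |>.mpr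
        ⟨by nlinarith [hdiv, hmb], by omega, by omega⟩ with ⟨h1, _⟩
    -- b / 2^n = -(m / 2^n) - 1, so bit n of b = 1 - bit n of m
    have hq2 : ((m / 2 ^ n % 2 : Nat) : Int) = ((m / 2 ^ n : Nat) : Int) % 2 := by
      push_cast; rfl
    have hbit : b / 2 ^ n % 2 = 1 - ((m / 2 ^ n : Nat) : Int) % 2 := by
      rw [h1]; omega
    rw [hbit, ← hq2]
    rcases Nat.mod_two_eq_zero_or_one (m / 2 ^ n) with h | h <;>
      simp [h, hpow]

-- `get_ith_bit b i` for 0 ≤ i is the i-th binary digit of b.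
theorem pv_gib (b i : Int) (_hi : 0 ≤ i) :
    get_ith_bit b i = b / 2 ^ i.toNat % 2 := by
  unfold get_ith_bit
  rw [pv_band_pow, PySem.Int.floordiv_eq_ediv_of_pos (by positivity),
    Int.mul_ediv_cancel _ (by positivity)]

-- closed form of A's accumulation loop
theorem pv_loop (b nb s : Int) (hnb : 1 ≤ nb) (E : Nat) (init : Int) :
    (PySem.List.pyRange 0 ((E : Nat) : Int) 1).foldl
      (fun res i =>
        if i < nb then res + get_ith_bit b i * (2:Int) ^ i.toNat
        else res + s * (2:Int) ^ i.toNat) init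
    = init + (b % 2 ^ (min E nb.toNat)
        + s * ((2:Int) ^ E - (2:Int) ^ (min E nb.toNat))) := by
  induction E generalizing init with
  | zero =>
    rw [show (((0:Nat):Int)) = 0 by rfl, PySem.List.pyRange_one_eq_nil (le_refl 0)]
    simp
  | succ k ih =>
    rw [show (((k+1:Nat)):Int) = ((k:Nat):Int) + 1 by push_cast; ring,
      PySem.List.pyRange_one_succ_right (by positivity), List.foldl_append, ih]
    simp only [List.foldl_cons, List.foldl_nil, Int.toNat_natCast]
    by_cases hk : ((k:Nat):Int) < nb
    · have hkN : k < nb.toNat := by omega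
      rw [if_pos hk, pv_gib b ((k:Nat):Int) (by positivity), Int.toNat_natCast,
        min_eq_left (by omega : k ≤ nb.toNat), min_eq_left (by omega : k + 1 ≤ nb.toNat),
        pv_emod_pow_succ]
      ring
    · have hkN : nb.toNat ≤ k := by omega
      rw [if_neg hk, min_eq_right hkN, min_eq_right (by omega : nb.toNat ≤ k + 1),
        pow_succ]
      ring

-- ===== VERDICT (by name: the statement is the Claim_ definition above) =====
theorem sign_extend_spec : Claim_equal_sign_extend := by
  intro b nb ext _hDom hPre
  have hnb : 1 ≤ nb := hPre
  unfold Spec_sign_extend sign_extend sign_extend_alt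
  dsimp only
  by_cases hext : ext ≤ 0
  · -- empty loop on A's side, zero mask on B's side
    rw [PySem.List.pyRange_one_eq_nil hext, max_eq_right hext,
      min_eq_right (by omega : (0:Int) ≤ nb)]
    simp only [List.foldl_nil, Int.toNat_zero]
    rw [show ((1:Int) <<< (0:Nat) - 1) = 0 by decide, PySem.Int.band_zero,
      if_neg (by omega)]
  · push_neg at hext
    set E : Nat := ext.toNat with hEdef
    set N : Nat := nb.toNat with hNdef
    have hE : ((E : Nat) : Int) = ext := Int.toNat_of_nonneg (by omega)
    have hN : ((N : Nat) : Int) = nb := Int.toNat_of_nonneg (by omega)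
    rw [← hE, pv_loop b nb _ hnb E 0, ← hNdef, max_eq_left (by positivity),
      min_comm nb, Int.toNat_natCast,
      show (min ((E:Nat):Int) nb).toNat = min E N by omega,
      Int.shiftLeft_eq, Int.shiftLeft_eq, Int.shiftLeft_eq, one_mul, one_mul, one_mul,
      pv_band_mask b (min E N),
      Int.shiftRight_eq_div_pow,
      show ((2 ^ ((nb - 1).toNat) : Nat) : Int) = (2:Int) ^ (N - 1) by
        rw [show (nb - 1).toNat = N - 1 by omega]; push_cast; rfl,
      PySem.Int.band_one,
      show PySem.Int.mod (b / 2 ^ (N - 1)) 2 = b / 2 ^ (N - 1) % 2 by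
        simp [PySem.Int.mod, Int.fmod_eq_emod],
      show get_ith_bit b (nb - 1) = b / 2 ^ (N - 1) % 2 by
        rw [pv_gib b (nb - 1) (by omega), show (nb - 1).toNat = N - 1 by omega]]
    set s : Int := b / 2 ^ (N - 1) % 2 with hsdef
    have hs : s = 0 ∨ s = 1 := Int.emod_two_eq_zero_or_one _
    by_cases hc : s ≠ 0 ∧ ((E:Nat):Int) > nb
    · rw [if_pos hc, min_eq_right (by omega : N ≤ E)]
      rcases hs with h0 | h1
      · exact absurd h0 hc.1
      · rw [h1]; ring
    · rw [if_neg hc]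
      rcases hs with h0 | h1
      · rw [h0]; ring
      · have hEN : E ≤ N := by
          rcases not_and_or.mp hc with h | h
          · exfalso; simp at h; omega
          · omega
        rw [min_eq_left hEN]
        ring
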